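-- pv_equiv track=rewrite | github.com/ryanxd2002/Tetris | Tetris.py | repr2dList
-- ===== SOURCE A (Python) =====
-- def repr2dList(L):
--     if (L == []): return '[]'
--     output = [ ]
--     rows = len(L)
--     cols = max([len(L[row]) for row in range(rows)])
--     M = [['']*cols for row in range(rows)]
--     for row in range(rows):
--         for col in range(len(L[row])):
--             M[row][col] = repr(L[row][col])
--     colWidths = [0] * cols
--     for col in range(cols):
--         colWidths[col] = max([len(M[row][col]) for row in range(rows)])
--     output.append('[\n')
--     for row in range(rows):
--         output.append(' [ ')
--         for col in range(cols):
--             if (col > 0):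
--                 output.append(', ' if col < len(L[row]) else '  ')
--             output.append(M[row][col].rjust(colWidths[col]))
--         output.append((' ],' if row < rows-1 else ' ]') + '\n')
--     output.append(']')
--     return ''.join(output)
-- ===== SOURCE B (Python) =====
-- def _merge(widths, row):
--     # pointwise max of current widths with this row's repr lengths (ragged-safe)
--     n = max(len(widths), len(row))
--     return [max(widths[c] if c < len(widths) else 0,
--                 len(row[c]) if c < len(row) else 0) for c in range(n)]
--
-- def repr2dList(L):
--     if L == []:
--         return '[]'
--     R = [[repr(x) for x in row] for row in L]
--     widths = []
--     for row in R:
--         widths = _merge(widths, row)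
--     lines = []
--     for i, row in enumerate(R):
--         body = ', '.join(s.rjust(widths[c]) for c, s in enumerate(row))
--         pad = ''.join(('  ' if c > 0 else '') + ' ' * widths[c]
--                       for c in range(len(row), len(widths)))
--         lines.append(' [ ' + body + pad + (' ],' if i < len(R) - 1 else ' ]'))
--     return '[\n' + '\n'.join(lines) + '\n]'
-- ===== Notes on version B (the rewrite author's own statement) =====
-- stated objective: alternative
-- what changed: B drops A's pre-padded rectangular matrix and index double-loops: it keeps the repr grid ragged, accumulates column widths in one pointwise-max fold over the rows, and renders each line as ', '.join of the row's own cells plus a padding suffix for the missing columns, assembling the output with '\n'.join.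
import Mathlib
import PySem

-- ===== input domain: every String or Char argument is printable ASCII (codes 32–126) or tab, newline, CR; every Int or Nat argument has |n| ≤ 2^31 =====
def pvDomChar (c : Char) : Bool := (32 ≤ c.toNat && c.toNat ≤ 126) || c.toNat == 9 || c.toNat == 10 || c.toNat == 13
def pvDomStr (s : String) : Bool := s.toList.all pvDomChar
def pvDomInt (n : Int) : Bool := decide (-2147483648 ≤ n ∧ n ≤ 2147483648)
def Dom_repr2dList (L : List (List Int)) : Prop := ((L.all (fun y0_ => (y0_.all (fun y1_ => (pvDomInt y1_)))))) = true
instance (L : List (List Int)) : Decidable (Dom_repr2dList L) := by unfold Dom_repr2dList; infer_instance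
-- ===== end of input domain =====

-- B renders each row by joining the row's own cells with ', ' and appending the padding for
-- missing columns, with column widths accumulated in one pointwise-max pass over the rows,
-- instead of A's index double-loops over a pre-padded rectangular matrix (objective: alternative).

-- ===== PORT A =====
-- str.rjust(w) with the fill character ' ' (exact: returns s unchanged when len(s) ≥ w)
def rjustl (s : List Char) (w : Nat) : List Char := List.replicate (w - s.length) ' ' ++ s

-- cols = max([len(L[row]) for row in range(rows)]) (L ≠ [] in the branch; getD 0 only totalizes)
def colsA (L : List (List Int)) : Nat :=
  (PySem.List.max? (L.map List.length) (fun x => x)).getD 0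

-- M[row] after the fill loop: reprs of the row's elements, then '' up to cols cells
def padRow (cols : Nat) (row : List Int) : List (List Char) :=
  row.map PySem.Int.toChars ++ List.replicate (cols - row.length) ([] : List Char)

def MA (L : List (List Int)) : List (List (List Char)) := L.map (padRow (colsA L))

-- colWidths[col] = max([len(M[row][col]) for row in range(rows)])
def colWidthsA (L : List (List Int)) : List Nat :=
  (List.range (colsA L)).map (fun c =>
    (PySem.List.max? ((MA L).map (fun r => (r.getD c []).length)) (fun x => x)).getD 0)

-- the inner 'for col in range(cols)' loop of one row (k = len(L[row]), Mr = M[row])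
def rowA (cw : List Nat) (cols k : Nat) (Mr : List (List Char)) : List Char :=
  (List.range cols).foldl (fun a c =>
    a ++ (if 0 < c then (if c < k then (", ".toList) else ("  ".toList)) else [])
      ++ rjustl (Mr.getD c []) (cw.getD c 0)) []

def repr2dList (L : List (List Int)) : String :=
  if L = [] then "[]" else
    String.mk
      ((((L.zip (MA L)).zipIdx).foldl (fun acc p =>
          acc ++ " [ ".toList
            ++ rowA (colWidthsA L) (colsA L) p.1.1.length p.1.2
            ++ (if p.2 < L.length - 1 then " ],".toList else " ]".toList) ++ ['\n'])
        ("[\n".toList)) ++ "]".toList)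

-- ===== PORT B =====
-- _merge(widths, row): pointwise max of the running widths with this row's cell lengths
def mergeW (widths : List Nat) (row : List (List Char)) : List Nat :=
  (List.range (max widths.length row.length)).map (fun c =>
    max (widths.getD c 0) (row.getD c []).length)

def widthsB (L : List (List Int)) : List Nat :=
  (L.map (fun row => row.map PySem.Int.toChars)).foldl mergeW []

-- one line's body: ', '.join of the row's own cells, then the padding for the missing columns
def rowB (w : List Nat) (row : List (List Char)) : List Char :=
  PySem.Chars.join (", ".toList) (row.zipIdx.map (fun q => rjustl q.1 (w.getD q.2 0)))
    ++ ((List.range' row.length (w.length - row.length)).map (fun c =>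
          (if 0 < c then "  ".toList else []) ++ List.replicate (w.getD c 0) ' ')).flatten

def repr2dList_alt (L : List (List Int)) : String :=
  if L = [] then "[]" else
    String.mk
      ("[\n".toList
        ++ PySem.Chars.join ['\n']
            (((L.map (fun row => row.map PySem.Int.toChars)).zipIdx).map (fun p =>
              " [ ".toList ++ rowB (widthsB L) p.1
                ++ (if p.2 < L.length - 1 then " ],".toList else " ]".toList)))
        ++ "\n]".toList)

-- ===== PRECONDITION & SPEC =====
def Spec_repr2dList (L : List (List Int)) (out : String) : Prop := out = repr2dList_alt L
instance (L : List (List Int)) (out : String) : Decidable (Spec_repr2dList L out) := by unfold Spec_repr2dList; infer_instance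

-- ===== CLAIM (what is proved, stated in full; the proofs are below) =====
def Claim_equal_repr2dList : Prop := ∀ (L : List (List Int)), Dom_repr2dList L → Spec_repr2dList L (repr2dList L)

-- ===== LEMMAS AND PROOFS =====

theorem getD_padRow (cols : Nat) (row : List Int) (c : Nat) :
    (padRow cols row).getD c [] = (row.map PySem.Int.toChars).getD c [] := by
  unfold padRow
  by_cases h : c < row.length
  · rw [List.getD_append _ _ _ _ (by simpa using h)]
  · simp only [List.getD, List.getElem?_append, List.getElem?_replicate]
    split
    · rfl
    · split <;> simp_all

theorem max?_getD_eq_foldl (x : Nat) (t : List Nat) :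
    (PySem.List.max? (x :: t) (fun y => y)).getD 0 = List.foldl max 0 (x :: t) := by
  rw [PySem.List.max?_id_cons]; simp

theorem mergeW_length (w : List Nat) (r : List (List Char)) :
    (mergeW w r).length = max w.length r.length := by simp [mergeW]

theorem mergeW_getD (w : List Nat) (r : List (List Char)) (c : Nat) :
    (mergeW w r).getD c 0 = max (w.getD c 0) (r.getD c []).length := by
  unfold mergeW
  by_cases h : c < max w.length r.length
  · rw [List.getD_eq_getElem _ _ (by simpa using h)]; simp
  · rw [List.getD_eq_default _ _ (by simpa using h)]
    rw [List.getD_eq_default _ _ (by omega), List.getD_eq_default _ _ (by omega)]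
    simp

theorem foldW_length (R : List (List (List Char))) (w : List Nat) :
    (R.foldl mergeW w).length = R.foldl (fun a r => max a r.length) w.length := by
  induction R generalizing w with
  | nil => rfl
  | cons r t ih => simp [List.foldl_cons, ih, mergeW_length]

theorem foldW_getD (R : List (List (List Char))) (w : List Nat) (c : Nat) :
    (R.foldl mergeW w).getD c 0
      = R.foldl (fun a r => max a (r.getD c []).length) (w.getD c 0) := by
  induction R generalizing w with
  | nil => rfl
  | cons r t ih => rw [List.foldl_cons, List.foldl_cons, ih, mergeW_getD]

theorem widthsB_length (x : List Int) (t : List (List Int)) :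
    (widthsB (x :: t)).length = colsA (x :: t) := by
  unfold widthsB colsA
  rw [foldW_length]
  conv_rhs => rw [List.map_cons, max?_getD_eq_foldl]
  simp [List.foldl_map]

theorem colfold_eq (t : List (List Int)) (cols c : Nat) (a : Nat) :
    List.foldl max a ((t.map (padRow cols)).map (fun r => (r.getD c []).length))
      = List.foldl (fun b r => max b (r.getD c []).length)
          a (t.map (fun row => row.map PySem.Int.toChars)) := by
  induction t generalizing a with
  | nil => rfl
  | cons r u ih =>
    simp only [List.map_cons, List.foldl_cons]
    rw [getD_padRow]
    exact ih _

theorem widths_eq (x : List Int) (t : List (List Int)) :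
    colWidthsA (x :: t) = widthsB (x :: t) := by
  apply List.ext_getElem
  · rw [widthsB_length]; simp [colWidthsA]
  · intro c h1 h2
    simp only [colWidthsA, MA, List.getElem_map, List.getElem_range]
    rw [List.map_cons, List.map_cons, max?_getD_eq_foldl, List.foldl_cons]
    rw [← List.getD_eq_getElem _ 0 h2]
    unfold widthsB
    rw [foldW_getD]
    conv_rhs => rw [List.map_cons, List.foldl_cons]
    rw [show (([]:List Nat).getD c 0) = 0 from rfl]
    rw [getD_padRow]
    exact colfold_eq t _ c _

theorem len_le_colsA (x : List Int) (t : List (List Int)) (r : List Int) (hr : r ∈ x :: t) :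
    r.length ≤ colsA (x :: t) := by
  unfold colsA
  have h : PySem.List.max? ((x :: t).map List.length) (fun y => y)
      = some (List.foldl max x.length (t.map List.length)) := by
    rw [List.map_cons]; exact PySem.List.max?_id_cons _ _
  have h2 := PySem.List.max?_isMax h r.length (List.mem_map_of_mem hr)
  rw [List.map_cons] at h ⊢
  rw [PySem.List.max?_id_cons]
  simpa using h2

theorem join_head (sep x : List Char) (rest : List (List Char)) :
    PySem.Chars.join sep (x :: rest) = x ++ rest.flatMap (fun y => sep ++ y) := by
  induction rest generalizing x with
  | nil => simp [PySem.Chars.join_singleton]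
  | cons b tl ih => rw [PySem.Chars.join_cons_cons, ih]; simp

theorem flatMap_range_join (sep : List Char) (u : Nat → List Char) (k : Nat) :
    (List.range k).flatMap (fun c => (if 0 < c then sep else []) ++ u c)
      = PySem.Chars.join sep ((List.range k).map u) := by
  cases k with
  | zero => simp [PySem.Chars.join_nil]
  | succ j =>
    rw [List.range_succ_eq_map, List.map_cons, join_head]
    simp [List.flatMap_map, Function.comp]

theorem zipIdx_map_getD (row : List (List Char)) (f : List Char → Nat → List Char) :
    row.zipIdx.map (fun q => f q.1 q.2)
      = (List.range row.length).map (fun c => f (row.getD c []) c) := by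
  apply List.ext_getElem
  · simp
  · intro i h1 h2
    simp only [List.getElem_map, List.getElem_zipIdx, List.getElem_range]
    rw [List.getD_eq_getElem _ _ (by simpa using h1)]
    simp

theorem row_eq (cw : List Nat) (cols : Nat) (row : List (List Char))
    (hlen : cw.length = cols) (hk : row.length ≤ cols) :
    rowA cw cols row.length (row ++ List.replicate (cols - row.length) [])
      = rowB cw row := by
  obtain ⟨d, rfl⟩ : ∃ d, cols = row.length + d := ⟨cols - row.length, by omega⟩
  unfold rowA rowB
  simp only [List.append_assoc, Nat.add_sub_cancel_left, hlen]
  rw [PySem.List.foldl_append_eq_flatMap, List.nil_append, List.range_add, List.flatMap_append]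
  congr 1
  -- the first k columns: the row's own cells joined by ', '
  · rw [zipIdx_map_getD row (fun s c => rjustl s (cw.getD c 0)), ← flatMap_range_join,
        List.flatMap_def, List.flatMap_def]
    apply congrArg
    apply List.map_congr_left
    intro c hcm
    have hck : c < row.length := List.mem_range.mp hcm
    rw [List.getD_append _ _ _ _ hck]
    simp [hck]
  -- the missing columns: two spaces then a blank cell of the column's width
  · rw [List.range'_eq_map_range, List.map_map, List.flatMap_map, List.flatMap_def]
    apply congrArg
    apply List.map_congr_left
    intro c hcm
    have hcd : c < d := List.mem_range.mp hcm
    have h1 : ¬ (row.length + c < row.length) := by omega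
    rw [List.getD_append_right _ _ _ _ (by omega)]
    have h2 : (List.replicate d ([]:List Char)).getD (row.length + c - row.length) [] = [] := by
      rw [Nat.add_sub_cancel_left, List.getD_eq_getElem _ _ (by simpa using hcd)]; simp
    rw [h2]
    simp [rjustl, h1, Function.comp]

theorem flatten_map_newline (ls : List (List Char)) (h : ls ≠ []) :
    (ls.map (fun s => s ++ ['\n'])).flatten = PySem.Chars.join ['\n'] ls ++ ['\n'] := by
  induction ls with
  | nil => simp at h
  | cons a t ih =>
    cases t with
    | nil => simp [PySem.Chars.join_singleton]
    | cons b u =>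
      rw [PySem.Chars.join_cons_cons]
      simp only [List.map_cons, List.flatten_cons] at ih ⊢
      rw [ih (by simp)]
      simp

-- ===== VERDICT (by name: the statement is the Claim_ definition above) =====
theorem repr2dList_spec : Claim_equal_repr2dList := by
  intro L _
  unfold Spec_repr2dList repr2dList repr2dList_alt
  cases L with
  | nil => rfl
  | cons x t =>
    rw [if_neg (by simp), if_neg (by simp)]
    apply congrArg String.mk
    rw [widths_eq]
    simp only [List.append_assoc]
    rw [PySem.List.foldl_append_eq_flatMap, List.flatMap_def]
    have hmap : (((x :: t).zip (MA (x :: t))).zipIdx).map (fun p =>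
          " [ ".toList ++ (rowA (widthsB (x :: t)) (colsA (x :: t)) p.1.1.length p.1.2
            ++ ((if p.2 < (x :: t).length - 1 then " ],".toList else " ]".toList) ++ ['\n'])))
        = ((((x :: t).map (fun row => row.map PySem.Int.toChars)).zipIdx).map (fun p =>
            " [ ".toList ++ (rowB (widthsB (x :: t)) p.1
              ++ (if p.2 < (x :: t).length - 1 then " ],".toList else " ]".toList)))).map
            (fun s => s ++ ['\n']) := by
      apply List.ext_getElem
      · simp [MA]
      · intro i h1 h2
        have hi : i < (x :: t).length := by simpa [MA] using h1
        simp only [List.getElem_map, List.getElem_zipIdx, List.getElem_zip, MA]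
        have hrq : rowA (widthsB (x :: t)) (colsA (x :: t)) ((x :: t)[i].length)
            (padRow (colsA (x :: t)) ((x :: t)[i]))
            = rowB (widthsB (x :: t)) ((x :: t)[i].map PySem.Int.toChars) := by
          have := row_eq (widthsB (x :: t)) (colsA (x :: t))
            ((x :: t)[i].map PySem.Int.toChars)
            (widthsB_length x t)
            (by simpa using len_le_colsA x t _ (List.getElem_mem hi))
          simpa [padRow, List.length_map] using this
        rw [hrq]
        simp [List.append_assoc]
    rw [hmap, flatten_map_newline _ (by simp)]
    simp [List.append_assoc]
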